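-- pv_equiv track=rewrite | github.com/AkhileshUkey84/SORA | backend/agents/lineage_agent.py | _smart_split_conditions
-- ===== SOURCE A (Python) =====
-- from typing import Dict, Any, List, Optional
--
-- def _smart_split_conditions(conditions: str) -> List[str]:
--     """Splits SQL conditions by AND/OR while preserving quoted strings"""
--     filters = []
--     current_filter = ""
--     in_single_quote = False
--     in_double_quote = False
--     i = 0
--
--     while i < len(conditions):
--         char = conditions[i]
--
--         # Handle quotes
--         if char == "'" and not in_double_quote:
--             in_single_quote = not in_single_quote
--         elif char == '"' and not in_single_quote:
--             in_double_quote = not in_double_quote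
--
--         # Check for AND/OR outside quotes
--         if not in_single_quote and not in_double_quote:
--             # Look for AND or OR (case-insensitive)
--             remaining = conditions[i:].upper()
--             if remaining.startswith(' AND '):
--                 # Found AND outside quotes
--                 if current_filter.strip():
--                     filters.append(current_filter.strip())
--                 current_filter = ""
--                 i += 5  # Skip ' AND '
--                 continue
--             elif remaining.startswith(' OR '):
--                 # Found OR outside quotes
--                 if current_filter.strip():
--                     filters.append(current_filter.strip())
--                 current_filter = ""
--                 i += 4  # Skip ' OR '
--                 continue
--
--         current_filter += char
--         i += 1
--
--     # Add the last filter
--     if current_filter.strip():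
--         filters.append(current_filter.strip())
--
--     return filters
-- ===== SOURCE B (Python) =====
-- from typing import List
--
-- def _smart_split_conditions(conditions: str) -> List[str]:
--     """Splits SQL conditions by AND/OR while preserving quoted strings.
--     Two-phase: precompute a quote mask, then cut segments by slicing."""
--     n = len(conditions)
--     # Phase 1: outside[i] = True iff we are outside quotes after char i.
--     outside = []
--     sq = dq = False
--     for ch in conditions:
--         if ch == "'" and not dq:
--             sq = not sq
--         elif ch == '"' and not sq:
--             dq = not dq
--         outside.append(not sq and not dq)
--     # Phase 2: cut at delimiters that start outside quotes.
--     res = []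
--     start = 0
--     i = 0
--     while i < n:
--         if outside[i] and conditions[i:i+5].upper() == ' AND ':
--             seg = conditions[start:i].strip()
--             if seg:
--                 res.append(seg)
--             start = i + 5
--             i = start
--         elif outside[i] and conditions[i:i+4].upper() == ' OR ':
--             seg = conditions[start:i].strip()
--             if seg:
--                 res.append(seg)
--             start = i + 4
--             i = start
--         else:
--             i += 1
--     seg = conditions[start:].strip()
--     if seg:
--         res.append(seg)
--     return res
-- ===== Notes on version B (the rewrite author's own statement) =====
-- stated objective: faster
-- what changed: A accumulates each segment character by character and uppercases the whole remaining string conditions[i:] at every outside-quote position; B precomputes a boolean quote mask in one pass, then walks an index with a start pointer, uppercasing only fixed 5-/4-char slices and cutting segments out by slicing.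
import Mathlib
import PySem

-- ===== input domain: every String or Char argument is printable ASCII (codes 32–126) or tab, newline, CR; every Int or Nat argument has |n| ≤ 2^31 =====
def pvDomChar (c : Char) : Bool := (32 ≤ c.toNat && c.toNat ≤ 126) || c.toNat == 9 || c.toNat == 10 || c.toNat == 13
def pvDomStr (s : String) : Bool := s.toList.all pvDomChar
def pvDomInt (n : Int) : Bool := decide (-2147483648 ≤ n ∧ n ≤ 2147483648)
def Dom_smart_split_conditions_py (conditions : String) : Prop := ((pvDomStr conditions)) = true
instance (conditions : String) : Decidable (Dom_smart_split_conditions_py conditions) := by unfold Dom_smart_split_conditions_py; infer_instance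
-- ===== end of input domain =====

-- B replaces A's single char-accumulating scan (which uppercases the whole remainder at each outside-quote position) by a two-phase split: a precomputed quote mask, then cutting segments out by index slicing; objective: faster (measured).


-- ===== PORT A =====
-- quote handling shared by both sources (identical lines in both Pythons):
-- if char == "'" and not in_double_quote: toggle single; elif char == '"' and not in_single_quote: toggle double

def pvStep (sq dq : Bool) (c : Char) : Bool × Bool :=
  if c = '\'' ∧ dq = false then (!sq, dq)
  else if c = '"' ∧ sq = false then (sq, !dq)
  else (sq, dq)

def pvAppendStripped (out : List String) (seg : List Char) : List String :=
  if PySem.Chars.strip seg ≠ [] then out ++ [String.ofList (PySem.Chars.strip seg)] else out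

-- "if seg.strip(): out.append(seg.strip())" — shared by both sources (truthiness of a str = nonempty)
def pvALoop (cs : List Char) (i : Nat) (sq dq : Bool) (cur : List Char) (filters : List String) :
    List String :=
  if h : i < cs.length then
    let c := cs[i]
    let s := pvStep sq dq c
    if s.1 = false ∧ s.2 = false then
      let remaining := PySem.Chars.upper (cs.drop i)
      if PySem.Chars.startswith remaining (" AND ".toList) then
        pvALoop cs (i + 5) s.1 s.2 [] (pvAppendStripped filters cur)
      else if PySem.Chars.startswith remaining (" OR ".toList) then
        pvALoop cs (i + 4) s.1 s.2 [] (pvAppendStripped filters cur)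
      else
        pvALoop cs (i + 1) s.1 s.2 (cur ++ [c]) filters
    else
      pvALoop cs (i + 1) s.1 s.2 (cur ++ [c]) filters
  else
    pvAppendStripped filters cur
termination_by cs.length - i
decreasing_by all_goals omega

def smart_split_conditions_py (conditions : String) : List String :=
  pvALoop conditions.toList 0 false false [] []

-- ===== PORT B =====
-- Phase 1: outside[i] = (not in_single_quote and not in_double_quote) after processing char i
def pvMask (sq dq : Bool) : List Char → List Bool
  | [] => []
  | c :: rest =>
    let s := pvStep sq dq c
    (!s.1 && !s.2) :: pvMask s.1 s.2 rest

-- Phase 2: walk i with a start pointer, cutting segments by slicing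
-- (conditions[a:b] for 0 ≤ a ≤ b ≤ len is exactly (cs.drop a).take (b - a): PySem.List.slice_toNat)
def pvBLoop (cs : List Char) (outside : List Bool) (start i : Nat) (res : List String) :
    List String :=
  if h : i < cs.length then
    if outside.getD i false = true ∧ PySem.Chars.upper ((cs.drop i).take 5) = " AND ".toList then
      pvBLoop cs outside (i + 5) (i + 5) (pvAppendStripped res ((cs.drop start).take (i - start)))
    else if outside.getD i false = true ∧ PySem.Chars.upper ((cs.drop i).take 4) = " OR ".toList then
      pvBLoop cs outside (i + 4) (i + 4) (pvAppendStripped res ((cs.drop start).take (i - start)))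
    else
      pvBLoop cs outside start (i + 1) res
  else
    pvAppendStripped res (cs.drop start)
termination_by cs.length - i
decreasing_by all_goals omega

def smart_split_conditions_py_alt (conditions : String) : List String :=
  let cs := conditions.toList
  pvBLoop cs (pvMask false false cs) 0 0 []

-- ===== PRECONDITION & SPEC =====
def Spec_smart_split_conditions_py (conditions : String) (out : List String) : Prop := out = smart_split_conditions_py_alt conditions
instance (conditions : String) (out : List String) : Decidable (Spec_smart_split_conditions_py conditions out) := by unfold Spec_smart_split_conditions_py; infer_instance

-- ===== CLAIM (what is proved, stated in full; the proofs are below) =====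
def Claim_equal_smart_split_conditions_py : Prop := ∀ (conditions : String), Dom_smart_split_conditions_py conditions → Spec_smart_split_conditions_py conditions (smart_split_conditions_py conditions)

-- ===== LEMMAS AND PROOFS =====
-- quote state after scanning a list of chars (both loops maintain it implicitly)
def pvQ (st : Bool × Bool) (l : List Char) : Bool × Bool :=
  l.foldl (fun s c => pvStep s.1 s.2 c) st

lemma pvQ_append (st : Bool × Bool) (l₁ l₂ : List Char) :
    pvQ st (l₁ ++ l₂) = pvQ (pvQ st l₁) l₂ := by
  simp [pvQ, List.foldl_append]

lemma pvQ_take_succ (cs : List Char) (i : Nat) (h : i < cs.length) (st : Bool × Bool) :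
    pvQ st (cs.take (i + 1)) = pvStep (pvQ st (cs.take i)).1 (pvQ st (cs.take i)).2 cs[i] := by
  rw [List.take_add_one, List.getElem?_eq_getElem h]
  simp only [pvQ, Option.toList_some, List.foldl_append, List.foldl_cons, List.foldl_nil]

lemma pvQ_noquote : ∀ (l : List Char) (st : Bool × Bool),
    (∀ c ∈ l, c ≠ '\'' ∧ c ≠ '"') → pvQ st l = st
  | [], _, _ => rfl
  | c :: rest, st, h => by
    have hc := h c (by simp)
    have hrest : ∀ x ∈ rest, x ≠ '\'' ∧ x ≠ '"' := fun x hx => h x (by simp [hx])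
    simp only [pvQ, List.foldl_cons]
    rw [show pvStep st.1 st.2 c = st by simp [pvStep, hc.1, hc.2]]
    exact pvQ_noquote rest st hrest

lemma pvMask_getD : ∀ (l : List Char) (sq dq : Bool) (i : Nat), i < l.length →
    (pvMask sq dq l).getD i false
      = (!(pvQ (sq, dq) (l.take (i + 1))).1 && !(pvQ (sq, dq) (l.take (i + 1))).2)
  | [], _, _, i, h => by simp at h
  | c :: rest, sq, dq, 0, h => by simp [pvMask, pvQ]
  | c :: rest, sq, dq, j + 1, h => by
    have hj : j < rest.length := by simpa using h
    have := pvMask_getD rest (pvStep sq dq c).1 (pvStep sq dq c).2 j hj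
    simp only [pvMask, List.getD_cons_succ, List.take_succ_cons]
    rw [this]
    congr 2

lemma pvStartswith_take (d P : List Char) :
    PySem.Chars.startswith (PySem.Chars.upper d) P = decide (PySem.Chars.upper (d.take P.length) = P) := by
  have hmt : PySem.Chars.upper (d.take P.length) = (PySem.Chars.upper d).take P.length := by
    simp [PySem.Chars.upper, List.map_take]
  rw [Bool.eq_iff_iff]
  simp only [decide_eq_true_eq, PySem.Chars.startswith_iff, List.prefix_iff_eq_take, hmt]
  exact eq_comm

lemma pvMatched_noquote (l : List Char) (P : List Char)
    (h : PySem.Chars.upper l = P) (hP : '\'' ∉ P ∧ '"' ∉ P) :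
    ∀ c ∈ l, c ≠ '\'' ∧ c ≠ '"' := by
  intro c hc
  have h1 : PySem.Chars.upperChar c ∈ P := by
    rw [← h]; exact List.mem_map_of_mem hc
  constructor
  · rintro rfl; exact hP.1 (by simpa using h1)
  · rintro rfl; exact hP.2 (by simpa using h1)

-- state after skipping k matched delimiter chars past i
lemma pvSkip_state (cs : List Char) (i k : Nat) (h : i < cs.length) (P : List Char) (hP : '\'' ∉ P ∧ '"' ∉ P)
    (hm : PySem.Chars.upper ((cs.drop i).take (k + 1)) = P) :
    pvQ (false, false) (cs.take (i + (k + 1))) = pvQ (false, false) (cs.take (i + 1)) := by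
  have htake : (cs.drop i).take (k + 1) = cs[i] :: (cs.drop (i + 1)).take k := by
    rw [List.drop_eq_getElem_cons h, List.take_succ_cons]
  have hsub : ∀ c ∈ (cs.drop (i + 1)).take k, c ∈ (cs.drop i).take (k + 1) := by
    rw [htake]; exact fun c hc => List.mem_cons_of_mem _ hc
  have hnq : ∀ c ∈ (cs.drop (i + 1)).take k, c ≠ '\'' ∧ c ≠ '"' :=
    fun c hc => pvMatched_noquote _ _ hm hP c (hsub c hc)
  have hsplit : cs.take (i + (k + 1)) = cs.take (i + 1) ++ (cs.drop (i + 1)).take k := by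
    rw [show i + (k + 1) = (i + 1) + k by omega, List.take_add]
  rw [hsplit, pvQ_append, pvQ_noquote _ _ hnq]

lemma pvLoop_eq (cs : List Char) : ∀ (n i start : Nat) (res : List String),
    start ≤ i → cs.length - i ≤ n →
    pvALoop cs i (pvQ (false, false) (cs.take i)).1 (pvQ (false, false) (cs.take i)).2
        ((cs.drop start).take (i - start)) res
      = pvBLoop cs (pvMask false false cs) start i res := by
  intro n
  induction n with
  | zero =>
    intro i start res hsi hn
    have hge : ¬ i < cs.length := by omega
    rw [pvALoop, pvBLoop]
    simp only [dif_neg hge]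
    rw [List.take_of_length_le (by simp; omega)]
  | succ m ih =>
    intro i start res hsi hn
    by_cases h : i < cs.length
    · rw [pvALoop, pvBLoop]
      simp only [dif_pos h]
      have hs : pvStep (pvQ (false, false) (cs.take i)).1 (pvQ (false, false) (cs.take i)).2 cs[i]
          = pvQ (false, false) (cs.take (i + 1)) := (pvQ_take_succ cs i h (false, false)).symm
      have hmask := pvMask_getD cs false false i h

      rw [hs, hmask, pvStartswith_take, pvStartswith_take,
        show (" AND ".toList).length = 5 from rfl, show (" OR ".toList).length = 4 from rfl,
        show (" AND ".toList) = [' ', 'A', 'N', 'D', ' '] from rfl,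
        show (" OR ".toList) = [' ', 'O', 'R', ' '] from rfl]
      set st' := pvQ (false, false) (cs.take (i + 1)) with hst'
      by_cases hq : st'.1 = false ∧ st'.2 = false
      · by_cases hand : PySem.Chars.upper ((cs.drop i).take 5) = [' ', 'A', 'N', 'D', ' ']
        · rw [if_pos hq, if_pos (by simp [hand]), if_pos (by simp [hq.1, hq.2, hand])]
          have hstate : pvQ (false, false) (cs.take (i + 5)) = st' :=
            pvSkip_state cs i 4 h _ ⟨by decide, by decide⟩ hand
          have := ih (i + 5) (i + 5) (pvAppendStripped res ((cs.drop start).take (i - start)))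
            (Nat.le_refl _) (by omega)
          rw [hstate] at this
          simpa using this
        · by_cases hor : PySem.Chars.upper ((cs.drop i).take 4) = [' ', 'O', 'R', ' ']
          · rw [if_pos hq, if_neg (by simp [hand]), if_pos (by simp [hor]),
              if_neg (by simp [hand]), if_pos (by simp [hq.1, hq.2, hor])]
            have hstate : pvQ (false, false) (cs.take (i + 4)) = st' :=
              pvSkip_state cs i 3 h _ ⟨by decide, by decide⟩ hor
            have := ih (i + 4) (i + 4) (pvAppendStripped res ((cs.drop start).take (i - start)))
              (Nat.le_refl _) (by omega)
            rw [hstate] at this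
            simpa using this
          · rw [if_pos hq, if_neg (by simp [hand]), if_neg (by simp [hor]),
              if_neg (by simp [hand]), if_neg (by simp [hor])]
            have hcur : (cs.drop start).take (i - start) ++ [cs[i]]
                = (cs.drop start).take (i + 1 - start) := by
              rw [show i + 1 - start = (i - start) + 1 by omega, List.take_add_one,
                List.getElem?_drop, show start + (i - start) = i by omega,
                List.getElem?_eq_getElem h]
              rfl
            have := ih (i + 1) start res (by omega) (by omega)
            rw [← hcur] at this
            exact this
          
      · rw [if_neg hq, if_neg (by simp [Bool.and_eq_true]; tauto),
          if_neg (by simp [Bool.and_eq_true]; tauto)]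
        have hcur : (cs.drop start).take (i - start) ++ [cs[i]]
            = (cs.drop start).take (i + 1 - start) := by
          rw [show i + 1 - start = (i - start) + 1 by omega, List.take_add_one,
            List.getElem?_drop, show start + (i - start) = i by omega,
            List.getElem?_eq_getElem h]
          rfl
        have := ih (i + 1) start res (by omega) (by omega)
        rw [← hcur] at this
        exact this
    · rw [pvALoop, pvBLoop]
      simp only [dif_neg h]
      rw [List.take_of_length_le (by simp; omega)]

-- ===== VERDICT (by name: the statement is the Claim_ definition above) =====
theorem smart_split_conditions_py_spec : Claim_equal_smart_split_conditions_py := by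
  intro conditions _
  unfold Spec_smart_split_conditions_py smart_split_conditions_py smart_split_conditions_py_alt
  exact pvLoop_eq conditions.toList conditions.toList.length 0 0 [] (Nat.le_refl 0) (by omega)
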